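-- pv_equiv track=rewrite | github.com/heohak/python | EX/ex08_solution_and_tests/solution.py | fruit_order
-- ===== SOURCE A (Python) =====
-- def fruit_order(small_baskets: int, big_baskets: int, ordered_amount: int) -> int:
--     """
--     Return number of small fruit baskets if it's possible to finish the order, otherwise return -1.
--
--     (4, 1, 9) -> 4
--     (3, 1, 10) -> -1
--     """
--     big_basket_kilos = big_baskets * 5
--     calc1 = big_basket_kilos + small_baskets
--
--     if calc1 == ordered_amount:
--         return small_baskets
--     elif small_baskets > ordered_amount:
--         return ordered_amount
--     elif big_basket_kilos == ordered_amount: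
--         return 0
--     elif big_basket_kilos > ordered_amount:
--         while big_basket_kilos > ordered_amount:
--             big_basket_kilos = big_basket_kilos - 5
--         b = ordered_amount - big_basket_kilos
--         if b <= small_baskets:
--             return b
--         else:
--             return -1
--     elif big_basket_kilos < ordered_amount:
--         x = ordered_amount - big_basket_kilos
--         if x <= small_baskets:
--             return x
--         else:
--             return -1
--     else:
--         return -1
-- ===== SOURCE B (Python) =====
-- def fruit_order(small_baskets: int, big_baskets: int, ordered_amount: int) -> int:
--     kilos = 5 * big_baskets
--     if kilos + small_baskets == ordered_amount:
--         return small_baskets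
--     if small_baskets > ordered_amount:
--         return ordered_amount
--     if kilos == ordered_amount:
--         return 0
--     need = ordered_amount % 5 if kilos > ordered_amount else ordered_amount - kilos
--     return need if need <= small_baskets else -1
-- ===== Notes on version B (the rewrite author's own statement) =====
-- stated objective: faster
-- what changed: The O(big_baskets) subtract-5 loop is replaced by the closed form ordered_amount % 5 (the loop lands on the first multiple-of-5 offset at or below the order, so the remainder is just the order mod 5).
import Mathlib
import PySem

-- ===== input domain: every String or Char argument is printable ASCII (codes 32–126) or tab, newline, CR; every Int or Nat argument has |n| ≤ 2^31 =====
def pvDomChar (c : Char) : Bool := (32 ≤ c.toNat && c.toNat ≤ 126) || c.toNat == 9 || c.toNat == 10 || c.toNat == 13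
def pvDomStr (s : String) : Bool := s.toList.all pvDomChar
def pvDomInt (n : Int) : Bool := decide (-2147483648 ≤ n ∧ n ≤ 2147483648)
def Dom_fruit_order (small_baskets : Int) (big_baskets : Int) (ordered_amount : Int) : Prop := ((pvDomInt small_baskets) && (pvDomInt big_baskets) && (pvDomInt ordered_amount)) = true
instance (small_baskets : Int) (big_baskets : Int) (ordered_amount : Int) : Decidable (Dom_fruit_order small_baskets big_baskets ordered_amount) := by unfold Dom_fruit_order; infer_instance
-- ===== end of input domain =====

-- B replaces A's O(big_baskets) subtract-5 loop by the closed form ordered_amount % 5 (faster).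

-- ===== PORT A =====
-- the 'while big_basket_kilos > ordered_amount: big_basket_kilos -= 5' loop
def pvALoop (big : Int) (ordered : Int) : Int :=
  if big > ordered then pvALoop (big - 5) ordered else big
termination_by (big - ordered).toNat
decreasing_by omega

def fruit_order (small_baskets : Int) (big_baskets : Int) (ordered_amount : Int) : Int :=
  let big_basket_kilos := big_baskets * 5
  let calc1 := big_basket_kilos + small_baskets
  if calc1 = ordered_amount then small_baskets
  else if small_baskets > ordered_amount then ordered_amount
  else if big_basket_kilos = ordered_amount then 0
  else if big_basket_kilos > ordered_amount then
    let big' := pvALoop big_basket_kilos ordered_amount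
    let b := ordered_amount - big'
    if b ≤ small_baskets then b else -1
  else if big_basket_kilos < ordered_amount then
    let x := ordered_amount - big_basket_kilos
    if x ≤ small_baskets then x else -1
  else -1

-- ===== PORT B =====
def fruit_order_alt (small_baskets : Int) (big_baskets : Int) (ordered_amount : Int) : Int :=
  let kilos := 5 * big_baskets
  if kilos + small_baskets = ordered_amount then small_baskets
  else if small_baskets > ordered_amount then ordered_amount
  else if kilos = ordered_amount then 0
  else
    let need := if kilos > ordered_amount then PySem.Int.mod ordered_amount 5
                else ordered_amount - kilos
    if need ≤ small_baskets then need else -1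

-- ===== PRECONDITION & SPEC =====
def Spec_fruit_order (small_baskets : Int) (big_baskets : Int) (ordered_amount : Int) (out : Int) : Prop := out = fruit_order_alt small_baskets big_baskets ordered_amount
instance (small_baskets : Int) (big_baskets : Int) (ordered_amount : Int) (out : Int) : Decidable (Spec_fruit_order small_baskets big_baskets ordered_amount out) := by unfold Spec_fruit_order; infer_instance

-- ===== CLAIM (what is proved, stated in full; the proofs are below) =====
def Claim_equal_fruit_order : Prop := ∀ (small_baskets : Int) (big_baskets : Int) (ordered_amount : Int), Dom_fruit_order small_baskets big_baskets ordered_amount → Spec_fruit_order small_baskets big_baskets ordered_amount (fruit_order small_baskets big_baskets ordered_amount)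

-- ===== LEMMAS AND PROOFS =====
-- The loop starting at a multiple of 5 above the order lands at the largest
-- multiple-of-5 offset ≤ ordered, so the remainder is ordered % 5 (emod).
theorem pvALoop_spec (big ordered : Int) (h5 : 5 ∣ big) (hlt : ordered < big) :
    ordered - pvALoop big ordered = ordered % 5 := by
  rw [pvALoop]
  rw [if_pos (by omega)]
  by_cases h : ordered < big - 5
  · exact pvALoop_spec (big - 5) ordered (by omega) h
  · rw [pvALoop, if_neg (by omega)]
    omega
termination_by (big - ordered).toNat
decreasing_by omega

theorem fruit_order_spec : Claim_equal_fruit_order := by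
  intro s b o _
  unfold Spec_fruit_order fruit_order fruit_order_alt
  have hmul : b * 5 = 5 * b := by ring
  simp only [hmul]
  by_cases h1 : 5 * b + s = o
  · simp [h1]
  by_cases h2 : s > o
  · simp [h1, h2]
  by_cases h3 : 5 * b = o
  · simp [h2, h3]
  by_cases h4 : 5 * b > o
  · have hk := pvALoop_spec (5 * b) o ⟨b, rfl⟩ (by omega)
    rw [show PySem.Int.mod o 5 = o % 5 from PySem.Int.mod_eq_emod_of_pos (by norm_num)]
    simp only [if_neg h1, if_neg h2, if_neg h3, if_pos h4, hk]
  · have h5 : 5 * b < o := by omega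
    simp [h1, h2, h3, h4, h5]

-- (verdict stated above by name)
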